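-- pv_equiv track=rewrite | github.com/RobbeW/Data_Statistiek_R | Deel 3 Algoritmiek/03 Hogere dimensie/Evaluatie/22 Randsom/solution/solution.nl.py | randsom
-- ===== SOURCE A (Python) =====
-- def randsom(rooster):
--     aantal_r = len(rooster)
--     aantal_c = len(rooster[0])
--
--     som = 0
--     for r in range(aantal_r):
--         if r == 0 or r == aantal_r-1:
--             som += sum(rooster[r])
--         else:
--             som += rooster[r][0] + rooster[r][aantal_c-1]
--
--     return som
-- ===== SOURCE B (Python) =====
-- def randsom(rooster):
--     totaal = sum(sum(rij) for rij in rooster)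
--     binnen = sum(sum(rij[1:-1]) for rij in rooster[1:-1])
--     return totaal - binnen
-- ===== Notes on version B (the rewrite author's own statement) =====
-- stated objective: simpler
-- what changed: B computes the border sum by complement — total of all cells minus the sum of the interior subgrid rooster[1:-1] with each row sliced rij[1:-1] — instead of A's index loop with a border/interior branch.
-- intended difference: On grids with at least 3 rows and exactly one column whose interior elements do not sum to 0, A counts every interior element twice (rooster[r][0] and rooster[r][aantal_c-1] are the same cell, e.g. 28 on [[5],[7],[9]]) while B counts each border cell once (21 there), which is the intended sum of the border elements. — e.g. on randsom([[5], [7], [9]]): A returns 28, B returns 21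
-- outside the precondition, e.g. on randsom([[1], [2, 3], [4]]): A returns 9, B returns 10
import Mathlib
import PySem

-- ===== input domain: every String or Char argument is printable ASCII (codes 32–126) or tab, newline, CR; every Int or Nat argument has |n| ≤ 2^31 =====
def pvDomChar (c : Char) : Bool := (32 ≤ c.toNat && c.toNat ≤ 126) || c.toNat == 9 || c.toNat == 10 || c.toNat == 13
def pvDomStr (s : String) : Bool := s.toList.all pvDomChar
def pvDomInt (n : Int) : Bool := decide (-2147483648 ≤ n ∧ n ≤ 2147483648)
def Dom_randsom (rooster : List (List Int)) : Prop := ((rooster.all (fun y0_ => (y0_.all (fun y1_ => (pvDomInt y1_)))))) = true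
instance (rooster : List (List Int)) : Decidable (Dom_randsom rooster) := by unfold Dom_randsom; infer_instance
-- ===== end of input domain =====

-- B computes the border sum as (total of all cells) − (sum of the interior subgrid
-- rooster[1:-1] sliced rij[1:-1]) instead of A's index loop with a border/interior branch;
-- objective: simpler, same cost.

-- ===== PORT A =====
def randsom (rooster : List (List Int)) : Int :=
  let aantal_r := rooster.length
  let aantal_c := (PySem.List.pyGetD rooster 0 []).length
  (PySem.List.pyRange 0 aantal_r 1).foldl
    (fun som r =>
      if r = 0 ∨ r = (aantal_r : Int) - 1 then
        som + (PySem.List.pyGetD rooster r []).sum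
      else
        som + (PySem.List.pyGetD (PySem.List.pyGetD rooster r []) 0 0
               + PySem.List.pyGetD (PySem.List.pyGetD rooster r []) ((aantal_c : Int) - 1) 0))
    0

-- ===== PORT B =====
def randsom_alt (rooster : List (List Int)) : Int :=
  let totaal := (rooster.map (fun rij => rij.sum)).sum
  let binnen := ((PySem.List.slice rooster (some 1) (some (-1))).map
    (fun rij => (PySem.List.slice rij (some 1) (some (-1))).sum)).sum
  totaal - binnen

-- ===== PRECONDITION & SPEC =====
-- Pre_ excludes the empty grid (A raises IndexError on rooster[0]) and grids with at
-- least 3 rows that are ragged or have an empty first row: there A indexes every interior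
-- row by the FIRST row's width (crash when the row is shorter, an accidental interior
-- column when it is longer), a value B's row-local slicing need not match.
def Pre_randsom (rooster : List (List Int)) : Prop :=
  rooster ≠ [] ∧ (3 ≤ rooster.length →
    (∀ rij ∈ rooster, rij.length = rooster.headI.length) ∧ 1 ≤ rooster.headI.length)
instance (rooster : List (List Int)) : Decidable (Pre_randsom rooster) := by
  unfold Pre_randsom; infer_instance
def pvWitness_randsom : List (List Int) := [[1, 2, 3], [4, 5, 6], [7, 8, 9]]

-- On grids with at least 3 rows and exactly one column whose interior elements do not sum
-- to 0, A counts every interior element twice (rooster[r][0] and rooster[r][aantal_c-1]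
-- are the same cell) while B counts each border cell once, which is the intended border sum.
def D_randsom (rooster : List (List Int)) : Prop :=
  3 ≤ rooster.length ∧ rooster.headI.length = 1 ∧ rooster.tail.dropLast.flatten.sum ≠ 0
instance (rooster : List (List Int)) : Decidable (D_randsom rooster) := by
  unfold D_randsom; infer_instance

def Spec_randsom (rooster : List (List Int)) (out : Int) : Prop :=
  ¬ D_randsom rooster → out = randsom_alt rooster
instance (rooster : List (List Int)) (out : Int) : Decidable (Spec_randsom rooster out) := by
  unfold Spec_randsom; infer_instance

def pvDiffWitness_randsom : List (List Int) := [[5], [7], [9]]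
def pvDiffWitnessOut_randsom : Int × Int := (28, 21)

-- ===== CLAIM (what is proved, stated in full; the proofs are below) =====
def Claim_unchanged_randsom : Prop := ∀ (rooster : List (List Int)), Dom_randsom rooster → Pre_randsom rooster → Spec_randsom rooster (randsom rooster)
def Claim_changed_randsom : Prop := Dom_randsom (pvDiffWitness_randsom) ∧ Pre_randsom (pvDiffWitness_randsom) ∧ D_randsom (pvDiffWitness_randsom) ∧ randsom (pvDiffWitness_randsom) = pvDiffWitnessOut_randsom.1 ∧ randsom_alt (pvDiffWitness_randsom) = pvDiffWitnessOut_randsom.2 ∧ pvDiffWitnessOut_randsom.1 ≠ pvDiffWitnessOut_randsom.2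
def Claim_exact_randsom : Prop := ∀ (rooster : List (List Int)), Dom_randsom rooster → Pre_randsom rooster → D_randsom rooster → randsom rooster ≠ randsom_alt rooster

-- ===== LEMMAS AND PROOFS =====

-- rooster[1:-1] / rij[1:-1] is 'drop the first, drop the last'
theorem pv_slice11 {α : Type} (xs : List α) :
    PySem.List.slice xs (some 1) (some (-1)) = xs.tail.dropLast := by
  cases xs with
  | nil => rfl
  | cons a t =>
      show List.take (PySem.List.clampIdx (a :: t).length (-1) - PySem.List.clampIdx (a :: t).length 1)
        (List.drop (PySem.List.clampIdx (a :: t).length 1) (a :: t)) = (a :: t).tail.dropLast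
      rw [PySem.List.clampIdx_neg_one]
      have h1 : PySem.List.clampIdx (a :: t).length 1 = 1 := by
        simp [PySem.List.clampIdx]
      rw [h1]
      simp [List.dropLast_eq_take]

-- Σ (f − g) = Σ f − Σ g over the interior rows
theorem pv_sum_sub_rows (f g : List Int → Int) (ys : List (List Int)) :
    (ys.map (fun rij => f rij - g rij)).sum = (ys.map f).sum - (ys.map g).sum := by
  induction ys with
  | nil => simp
  | cons a t ih => simp only [List.map_cons, List.sum_cons, ih]; ring

-- A's loop, for a grid with at least two rows, is: top row + bottom row + per-interior-row
-- (first element + element at first-row-width − 1)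
theorem pv_A_char (x z : List Int) (ys : List (List Int)) :
    randsom (x :: (ys ++ [z])) =
      x.sum + z.sum +
      (ys.map (fun rij => PySem.List.pyGetD rij 0 0
        + PySem.List.pyGetD rij ((x.length : Int) - 1) 0)).sum := by
  unfold randsom
  simp only [PySem.List.pyGetD_zero_cons]
  rw [show (fun (som : Int) (r : Int) =>
        if r = 0 ∨ r = (((x :: (ys ++ [z])).length : Nat) : Int) - 1 then
          som + (PySem.List.pyGetD (x :: (ys ++ [z])) r []).sum
        else
          som + (PySem.List.pyGetD (PySem.List.pyGetD (x :: (ys ++ [z])) r []) 0 0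
                 + PySem.List.pyGetD (PySem.List.pyGetD (x :: (ys ++ [z])) r []) ((x.length : Int) - 1) 0))
      = (fun som r => som +
          (if r = 0 ∨ r = (((x :: (ys ++ [z])).length : Nat) : Int) - 1 then
            (PySem.List.pyGetD (x :: (ys ++ [z])) r []).sum
          else
            PySem.List.pyGetD (PySem.List.pyGetD (x :: (ys ++ [z])) r []) 0 0
              + PySem.List.pyGetD (PySem.List.pyGetD (x :: (ys ++ [z])) r []) ((x.length : Int) - 1) 0)) from by
        funext s r; split <;> rfl]
  rw [PySem.List.foldl_add]
  have hN : (((x :: (ys ++ [z])).length : Nat) : Int) = (ys.length : Int) + 2 := by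
    simp only [List.length_cons, List.length_append, List.length_cons, List.length_nil]
    push_cast; ring
  rw [hN]
  rw [PySem.List.pyRange_one_append 0 1 ((ys.length : Int) + 2) (by omega) (by omega),
      PySem.List.pyRange_one_append 1 ((ys.length : Int) + 1) ((ys.length : Int) + 2)
        (by omega) (by omega),
      show PySem.List.pyRange (0 : Int) 1 = [0] from PySem.List.pyRange_one_singleton 0,
      show PySem.List.pyRange ((ys.length : Int) + 1) ((ys.length : Int) + 2)
          = [(ys.length : Int) + 1] from by
        have := PySem.List.pyRange_one_singleton ((ys.length : Int) + 1)
        simpa [add_assoc] using this]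
  rw [List.map_append, List.map_append, List.sum_append, List.sum_append]
  -- the first entry: the whole top row
  have h0 : ([(0 : Int)].map (fun r =>
        if r = 0 ∨ r = (ys.length : Int) + 2 - 1 then
          (PySem.List.pyGetD (x :: (ys ++ [z])) r []).sum
        else
          PySem.List.pyGetD (PySem.List.pyGetD (x :: (ys ++ [z])) r []) 0 0
            + PySem.List.pyGetD (PySem.List.pyGetD (x :: (ys ++ [z])) r []) ((x.length : Int) - 1) 0)).sum
      = x.sum := by
    simp
  -- the last entry: the whole bottom row
  have hz : ([((ys.length : Int) + 1)].map (fun r =>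
        if r = 0 ∨ r = (ys.length : Int) + 2 - 1 then
          (PySem.List.pyGetD (x :: (ys ++ [z])) r []).sum
        else
          PySem.List.pyGetD (PySem.List.pyGetD (x :: (ys ++ [z])) r []) 0 0
            + PySem.List.pyGetD (PySem.List.pyGetD (x :: (ys ++ [z])) r []) ((x.length : Int) - 1) 0)).sum
      = z.sum := by
    have hget : PySem.List.pyGetD (x :: (ys ++ [z])) ((ys.length : Int) + 1) [] = z := by
      rw [show ((ys.length : Int) + 1) = (((ys.length + 1 : Nat)) : Int) from by push_cast; ring,
          PySem.List.pyGetD_natCast]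
      rw [List.getD_eq_getElem _ _ (by simp)]
      simp
    simp only [List.map_cons, List.map_nil, List.sum_cons, List.sum_nil]
    rw [if_pos (Or.inr (by ring)), hget]
    ring
  -- interior entries
  have hmid : (PySem.List.pyRange 1 ((ys.length : Int) + 1)).map (fun r =>
        if r = 0 ∨ r = (ys.length : Int) + 2 - 1 then
          (PySem.List.pyGetD (x :: (ys ++ [z])) r []).sum
        else
          PySem.List.pyGetD (PySem.List.pyGetD (x :: (ys ++ [z])) r []) 0 0
            + PySem.List.pyGetD (PySem.List.pyGetD (x :: (ys ++ [z])) r []) ((x.length : Int) - 1) 0)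
      = (ys.map (fun rij => PySem.List.pyGetD rij 0 0
          + PySem.List.pyGetD rij ((x.length : Int) - 1) 0)) := by
    have hstep : ∀ r ∈ PySem.List.pyRange 1 ((ys.length : Int) + 1),
        (if r = 0 ∨ r = (ys.length : Int) + 2 - 1 then
          (PySem.List.pyGetD (x :: (ys ++ [z])) r []).sum
        else
          PySem.List.pyGetD (PySem.List.pyGetD (x :: (ys ++ [z])) r []) 0 0
            + PySem.List.pyGetD (PySem.List.pyGetD (x :: (ys ++ [z])) r []) ((x.length : Int) - 1) 0)
        = (fun rij => PySem.List.pyGetD rij 0 0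
            + PySem.List.pyGetD rij ((x.length : Int) - 1) 0)
            (PySem.List.pyGetD (x :: ys) r []) := by
      intro r hr
      rw [PySem.List.mem_pyRange_one] at hr
      rw [if_neg (by rintro (h | h) <;> omega)]
      have hagree : PySem.List.pyGetD (x :: (ys ++ [z])) r [] = PySem.List.pyGetD (x :: ys) r [] := by
        rw [PySem.List.pyGetD_eq_getElem _ ([] : List Int) (by omega) (by simp; omega),
            PySem.List.pyGetD_eq_getElem _ ([] : List Int) (by omega) (by simp; omega)]
        simp only [← List.cons_append]
        rw [List.getElem_append_left (by simp; omega)]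
      rw [hagree]
    rw [List.map_congr_left hstep]
    rw [show (ys.length : Int) + 1 = ((x :: ys).length : Int) from by simp]
    have hr := PySem.List.map_pyGetD_pyRange' (x :: ys) ([] : List Int) (a := 1) (by omega)
    conv_rhs => rw [show ys = ((x :: ys).drop (1 : Int).toNat) from rfl, ← hr]
    rw [List.map_map]
    rfl
  rw [h0, hz, hmid]
  ring

-- B, for a grid with at least two rows, is: top row + bottom row + per-interior-row
-- (row sum minus the sum of the row without its endpoints)
theorem pv_B_char (x z : List Int) (ys : List (List Int)) :
    randsom_alt (x :: (ys ++ [z])) =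
      x.sum + z.sum + (ys.map (fun rij => rij.sum - rij.tail.dropLast.sum)).sum := by
  unfold randsom_alt
  rw [pv_slice11]
  have htl : (x :: (ys ++ [z])).tail.dropLast = ys := by
    rcases ys with _ | ⟨y, t⟩
    · rfl
    · rw [show (x :: ((y :: t) ++ [z])).tail.dropLast = ((y :: t) ++ [z]).dropLast from rfl,
          List.dropLast_concat]
  rw [htl]
  simp only [List.map_cons, List.map_append, List.sum_cons, List.sum_append,
    List.map_nil, List.sum_nil]
  have hmap : (ys.map (fun rij => (PySem.List.slice rij (some 1) (some (-1))).sum))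
      = ys.map (fun rij => rij.tail.dropLast.sum) := by
    apply List.map_congr_left; intro rij _; rw [pv_slice11]
  rw [hmap, pv_sum_sub_rows (fun rij => rij.sum) (fun rij => rij.tail.dropLast.sum)]
  ring

-- a row of the stated width contributes the same to A and to B, up to the width-1 double count
theorem pv_row (x rij : List Int) (h : rij.length = x.length ∧ 1 ≤ x.length) :
    PySem.List.pyGetD rij 0 0 + PySem.List.pyGetD rij ((x.length : Int) - 1) 0
      = (rij.sum - rij.tail.dropLast.sum) + (if x.length = 1 then rij.sum else 0) := by
  obtain ⟨hlen, hw⟩ := h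
  rcases rij with _ | ⟨a, rest⟩
  · simp at hlen; omega
  · rcases rest with _ | ⟨b, t⟩
    · -- width is 1
      have hx1 : x.length = 1 := by simpa using hlen.symm
      simp [hx1, PySem.List.pyGetD_zero_cons]
    · -- width at least 2
      have hx : x.length = t.length + 2 := by simpa using hlen.symm
      rw [if_neg (by omega)]
      have hlast : PySem.List.pyGetD (a :: b :: t) ((x.length : Int) - 1) 0
          = (b :: t).getLast (by simp) := by
        rw [show ((x.length : Int) - 1) = (((t.length + 1 : Nat)) : Int) from by
              rw [hx]; push_cast; ring,
            PySem.List.pyGetD_natCast, List.getD_cons_succ,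
            List.getD_eq_getElem _ _ (by simp),
            List.getLast_eq_getElem]
        congr 1
      rw [hlast, PySem.List.pyGetD_zero_cons]
      have hsplit : (b :: t).sum
          = (b :: t).dropLast.sum + (b :: t).getLast (by simp) := by
        conv_lhs => rw [← List.dropLast_append_getLast (l := b :: t) (by simp)]
        rw [List.sum_append]; simp
      have hsum : (a :: b :: t).sum = a + (b :: t).sum := by simp
      rw [List.tail_cons]
      omega

-- splitting off the width-1 double count, row by row
theorem pv_split1 (ys : List (List Int)) :
    (ys.map (fun rij => rij.sum - rij.tail.dropLast.sum + rij.sum)).sum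
      = (ys.map (fun rij => rij.sum - rij.tail.dropLast.sum)).sum + ys.flatten.sum := by
  induction ys with
  | nil => simp
  | cons a t ih =>
      simp only [List.map_cons, List.sum_cons, List.flatten_cons, List.sum_append, ih]
      ring

-- master: on a Pre_-shaped grid with ≥ 2 rows, A = B + (width-1 double count of the interior)
theorem pv_master (x z : List Int) (ys : List (List Int))
    (h : ∀ rij ∈ ys, rij.length = x.length ∧ 1 ≤ x.length) :
    randsom (x :: (ys ++ [z])) = randsom_alt (x :: (ys ++ [z]))
      + (if x.length = 1 then ys.flatten.sum else 0) := by
  rw [pv_A_char, pv_B_char]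
  rw [List.map_congr_left (fun rij hm => pv_row x rij (h rij hm))]
  by_cases hwx : x.length = 1
  · simp only [if_pos hwx]
    rw [pv_split1]; ring
  · simp only [if_neg hwx, add_zero]

-- one-row grid: both are the sum of the single row
theorem pv_single (x : List Int) : randsom [x] = randsom_alt [x] := by
  unfold randsom randsom_alt
  rw [pv_slice11]
  simp [show PySem.List.pyRange (0:Int) 1 = [0] from PySem.List.pyRange_one_singleton 0,
    PySem.List.pyGetD_zero_cons]

-- the shared hypothesis of pv_master, extracted from Pre_
theorem pv_pre_rows (x z : List Int) (ys : List (List Int))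
    (hpre : Pre_randsom (x :: (ys ++ [z]))) :
    ∀ rij ∈ ys, rij.length = x.length ∧ 1 ≤ x.length := by
  intro rij hm
  rcases ys with _ | ⟨y, t⟩
  · simp at hm
  · obtain ⟨hrect, hw⟩ := hpre.2 (by simp)
    have hx : (x :: ((y :: t) ++ [z])).headI = x := rfl
    rw [hx] at hrect hw
    exact ⟨hrect rij (by simp at hm ⊢; tauto), hw⟩

-- ===== VERDICT (by name: the statements are the Claim_ definitions above) =====
theorem randsom_spec : Claim_unchanged_randsom := by
  intro rooster _ hpre hnd
  obtain ⟨x, xs, rfl⟩ := List.exists_cons_of_ne_nil hpre.1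
  rcases xs.eq_nil_or_concat with rfl | ⟨ys, z, rfl⟩
  · exact pv_single x
  · rw [List.concat_eq_append] at hpre hnd ⊢
    rw [pv_master x z ys (pv_pre_rows x z ys hpre)]
    by_cases hw : x.length = 1
    · rw [if_pos hw]
      rcases ys with _ | ⟨y, t⟩
      · simp
      · have hS : ((y :: t) : List (List Int)).flatten.sum = 0 := by
          by_contra hS
          apply hnd
          refine ⟨by simp, by simpa using hw, ?_⟩
          have htl : (x :: ((y :: t) ++ [z])).tail.dropLast = (y :: t) := by
            rw [show (x :: ((y :: t) ++ [z])).tail.dropLast = ((y :: t) ++ [z]).dropLast from rfl,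
                List.dropLast_concat]
          rwa [htl]
        rw [hS]; ring
    · rw [if_neg hw]; ring

theorem randsom_changed : Claim_changed_randsom := by
  unfold Claim_changed_randsom; decide

theorem randsom_tight : Claim_exact_randsom := by
  intro rooster _ hpre hd
  obtain ⟨x, xs, rfl⟩ := List.exists_cons_of_ne_nil hpre.1
  rcases xs.eq_nil_or_concat with rfl | ⟨ys, z, rfl⟩
  · simp [D_randsom] at hd
  · rw [List.concat_eq_append] at hpre hd ⊢
    obtain ⟨hn, hw, hS⟩ := hd
    have hx1 : x.length = 1 := by simpa using hw
    have hSy : ys.flatten.sum ≠ 0 := by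
      have htl : (x :: (ys ++ [z])).tail.dropLast = ys := by
        rcases ys with _ | ⟨y, t⟩
        · rfl
        · rw [show (x :: ((y :: t) ++ [z])).tail.dropLast = ((y :: t) ++ [z]).dropLast from rfl,
              List.dropLast_concat]
      rwa [htl] at hS
    rw [pv_master x z ys (pv_pre_rows x z ys hpre), if_pos hx1]
    intro h
    omega
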